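-- pv_equiv track=rewrite | github.com/crc1200/CS440-Artificial-Intelligence | MP 1/template/naive_bayes.py | create_word_counts
-- ===== SOURCE A (Python) =====
-- from collections import Counter
--
-- def create_word_counts(train_set, train_labels):
--
--     positive_word_count = {}
--     negative_word_count = {}
--
--     total_positive_words = 0
--     total_negative_words = 0
--
--     for i in range(len(train_labels)):
--         word_list = train_set[i]
--         label = train_labels[i]
--         x = Counter(word_list)
--         for key, value in x.items():
--             if label:
--                 positive_word_count[key] = positive_word_count.get(key, 0) + value
--                 total_positive_words += value
--             else:
--                 negative_word_count[key] = negative_word_count.get(key, 0) + value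
--                 total_negative_words += value
--
--     return positive_word_count, negative_word_count, total_positive_words, total_negative_words
-- ===== SOURCE B (Python) =====
-- from collections import Counter
--
-- def create_word_counts(train_set, train_labels):
--     positive_words = []
--     negative_words = []
--     for words, label in zip(train_set, train_labels):
--         (positive_words if label else negative_words).extend(words)
--     return (dict(Counter(positive_words)), dict(Counter(negative_words)),
--             len(positive_words), len(negative_words))
-- ===== Notes on version B (the rewrite author's own statement) =====
-- stated objective: simpler
-- what changed: Replaced the interleaved per-document Counter plus inner dict-accumulation loop with a partition-then-count decomposition: one pass flattens words into two lists by label, then a single Counter per label and len() give the dicts and totals.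
import Mathlib
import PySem

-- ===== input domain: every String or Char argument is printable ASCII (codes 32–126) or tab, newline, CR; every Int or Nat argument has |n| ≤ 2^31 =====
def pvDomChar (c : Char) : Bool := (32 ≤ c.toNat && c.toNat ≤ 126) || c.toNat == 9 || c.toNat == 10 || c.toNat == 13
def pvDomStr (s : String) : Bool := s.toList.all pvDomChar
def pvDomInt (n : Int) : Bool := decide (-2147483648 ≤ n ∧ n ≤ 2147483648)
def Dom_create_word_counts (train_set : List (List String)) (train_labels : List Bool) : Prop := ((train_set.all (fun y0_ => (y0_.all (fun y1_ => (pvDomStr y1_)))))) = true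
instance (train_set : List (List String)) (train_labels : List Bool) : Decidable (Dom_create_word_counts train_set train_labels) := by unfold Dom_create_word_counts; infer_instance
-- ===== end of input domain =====

-- B replaces A's interleaved per-document Counter + dict-merge loop by a partition-then-count
-- decomposition (flatten words by label, then one Counter per label); objective: simpler.

-- ===== PORT A =====
def create_word_counts (train_set : List (List String)) (train_labels : List Bool) : (List (String × Int)) × (List (String × Int)) × Int × Int :=
  -- for i in range(len(train_labels)): … ; Pre_ guarantees train_set[i] is in range, so pyGetD is exact there
  let st := (PySem.List.pyRange 0 (PySem.List.len train_labels) 1).foldl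
    (fun (st : PySem.Dict String Int × PySem.Dict String Int × Int × Int) i =>
      let word_list := PySem.List.pyGetD train_set i []
      let label := PySem.List.pyGetD train_labels i false
      let x := PySem.Dict.counter word_list
      x.items.foldl
        (fun st kv =>
          if label then
            (st.1.insert kv.1 (st.1.getD kv.1 0 + kv.2), st.2.1, st.2.2.1 + kv.2, st.2.2.2)
          else
            (st.1, st.2.1.insert kv.1 (st.2.1.getD kv.1 0 + kv.2), st.2.2.1, st.2.2.2 + kv.2))
        st)
    (PySem.Dict.empty, PySem.Dict.empty, 0, 0)
  (st.1.items, st.2.1.items, st.2.2.1, st.2.2.2)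

-- ===== PORT B =====
def create_word_counts_alt (train_set : List (List String)) (train_labels : List Bool) : (List (String × Int)) × (List (String × Int)) × Int × Int :=
  let pn := (train_set.zip train_labels).foldl
    (fun (pn : List String × List String) p =>
      if p.2 then (pn.1 ++ p.1, pn.2) else (pn.1, pn.2 ++ p.1)) ([], [])
  ((PySem.Dict.counter pn.1).items, (PySem.Dict.counter pn.2).items,
   PySem.List.len pn.1, PySem.List.len pn.2)

-- ===== PRECONDITION & SPEC =====
-- Pre_ excludes only inputs where A raises IndexError: train_set[i] with i < len(train_labels) must exist.
def Pre_create_word_counts (train_set : List (List String)) (train_labels : List Bool) : Prop :=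
  train_labels.length ≤ train_set.length
instance (train_set : List (List String)) (train_labels : List Bool) : Decidable (Pre_create_word_counts train_set train_labels) := by unfold Pre_create_word_counts; infer_instance
def pvWitness_create_word_counts : List (List String) × List Bool := ([["a", "b", "a"], ["c"]], [true, false])

def Spec_create_word_counts (train_set : List (List String)) (train_labels : List Bool) (out : (List (String × Int)) × (List (String × Int)) × Int × Int) : Prop := out = create_word_counts_alt train_set train_labels
instance (train_set : List (List String)) (train_labels : List Bool) (out : (List (String × Int)) × (List (String × Int)) × Int × Int) : Decidable (Spec_create_word_counts train_set train_labels out) := by unfold Spec_create_word_counts; infer_instance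

-- ===== CLAIM (what is proved, stated in full; the proofs are below) =====
def Claim_equal_create_word_counts : Prop := ∀ (train_set : List (List String)) (train_labels : List Bool), Dom_create_word_counts train_set train_labels → Pre_create_word_counts train_set train_labels → Spec_create_word_counts train_set train_labels (create_word_counts train_set train_labels)

-- ===== LEMMAS AND PROOFS =====

-- A's inner per-document fold carries (posDict, negDict, tp, tn); it only touches one (Dict, total) pair.
def pvAddCounts (s : PySem.Dict String Int × Int) (l : List (String × Int)) : PySem.Dict String Int × Int :=
  l.foldl (fun s kv => (s.1.insert kv.1 (s.1.getD kv.1 0 + kv.2), s.2 + kv.2)) s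

theorem pv_step_true (l : List (String × Int)) (p n : PySem.Dict String Int) (tp tn : Int) :
    l.foldl (fun (st : PySem.Dict String Int × PySem.Dict String Int × Int × Int) kv =>
        (st.1.insert kv.1 (st.1.getD kv.1 0 + kv.2), st.2.1, st.2.2.1 + kv.2, st.2.2.2)) (p, n, tp, tn)
    = ((pvAddCounts (p, tp) l).1, n, (pvAddCounts (p, tp) l).2, tn) := by
  induction l generalizing p tp with
  | nil => rfl
  | cons kv rest ih => simp [pvAddCounts, List.foldl_cons] at *; exact ih _ _

theorem pv_step_false (l : List (String × Int)) (p n : PySem.Dict String Int) (tp tn : Int) :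
    l.foldl (fun (st : PySem.Dict String Int × PySem.Dict String Int × Int × Int) kv =>
        (st.1, st.2.1.insert kv.1 (st.2.1.getD kv.1 0 + kv.2), st.2.2.1, st.2.2.2 + kv.2)) (p, n, tp, tn)
    = (p, (pvAddCounts (n, tn) l).1, tp, (pvAddCounts (n, tn) l).2) := by
  induction l generalizing n tn with
  | nil => rfl
  | cons kv rest ih => simp [pvAddCounts, List.foldl_cons] at *; exact ih _ _

theorem pv_foldKeys_getD (ks : List String) (c : String → Int) (d : PySem.Dict String Int) (v : String) (h : ks.Nodup) :
    (ks.foldl (fun d k => d.insert k (d.getD k 0 + c k)) d).getD v 0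
    = if v ∈ ks then d.getD v 0 + c v else d.getD v 0 := by
  induction ks generalizing d with
  | nil => simp
  | cons k rest ih =>
    simp only [List.nodup_cons] at h
    rw [List.foldl_cons, ih _ h.2]
    by_cases hv : v = k
    · subst hv
      simp [h.1, PySem.Dict.getD_insert_self]
    · simp [PySem.Dict.getD_insert, hv]

theorem pv_sum_counter (ws : List String) :
    (((PySem.Dict.counter ws : PySem.Dict String Int).items.map (·.2)).sum) = (ws.length : Int) := by
  rw [PySem.Dict.items_counter, List.map_map]
  have hperm : (PySem.Set.ofList ws).Perm ws.dedup := by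
    rw [List.perm_ext_iff_of_nodup (PySem.Set.nodup_ofList ws) ws.nodup_dedup]
    intro a; rw [PySem.Set.mem_ofList, List.mem_dedup]
  calc (List.map ((fun p => p.2) ∘ fun k => (k, (List.count k ws : Int))) (PySem.Set.ofList ws)).sum
      = ((PySem.Set.ofList ws).map (fun k => (List.count k ws : Int))).sum := rfl
    _ = (ws.dedup.map (fun k => (List.count k ws : Int))).sum := (hperm.map _).sum_eq
    _ = ((ws.dedup.map (fun k => List.count k ws)).sum : Int) := by
          push_cast; simp [List.map_map]; rfl
    _ = (ws.length : Int) := by rw [List.sum_map_count_dedup_eq_length]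

theorem pvAddCounts_eq (l : List (String × Int)) (d : PySem.Dict String Int) (t : Int) :
    pvAddCounts (d, t) l
    = (l.foldl (fun d kv => d.insert kv.1 (d.getD kv.1 0 + kv.2)) d, t + (l.map (·.2)).sum) := by
  induction l generalizing d t with
  | nil => simp [pvAddCounts]
  | cons kv rest ih =>
    simp only [pvAddCounts, List.foldl_cons, List.map_cons, List.sum_cons] at *
    rw [ih]; ring_nf

theorem pv_update_ofList (s : PySem.Set String) (ws : List String) :
    s.update (PySem.Set.ofList ws) = s.update ws := by
  rw [PySem.Set.update_eq_append_filter, PySem.Set.update_eq_append_filter, PySem.Set.ofList_ofList]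

theorem pv_merge_counter (ws P : List String) :
    pvAddCounts (PySem.Dict.counter P, (P.length : Int)) (PySem.Dict.counter ws : PySem.Dict String Int).items
    = (PySem.Dict.counter (P ++ ws), ((P ++ ws).length : Int)) := by
  rw [pvAddCounts_eq]
  refine Prod.ext ?_ ?_
  · -- the merged dict
    show (PySem.Dict.counter ws : PySem.Dict String Int).items.foldl
        (fun d kv => d.insert kv.1 (d.getD kv.1 0 + kv.2)) (PySem.Dict.counter P)
      = PySem.Dict.counter (P ++ ws)
    rw [PySem.Dict.items_counter, List.foldl_map]
    have hkeys : (List.foldl (fun d (k : String) =>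
          d.insert k (d.getD k 0 + (List.count k ws : Int))) (PySem.Dict.counter P)
          (PySem.Set.ofList ws)).keys = PySem.Set.ofList (P ++ ws) := by
      rw [PySem.Dict.keys_foldl_insert, PySem.Dict.keys_counter, pv_update_ofList,
        PySem.Set.ofList_append]
    have hnd : (List.foldl (fun d (k : String) =>
          d.insert k (d.getD k 0 + (List.count k ws : Int))) (PySem.Dict.counter P)
          (PySem.Set.ofList ws)).keys.Nodup :=
      PySem.Dict.nodup_keys_foldl_insert _ _ _ (PySem.Dict.nodup_keys_counter P)
    apply PySem.Dict.ext
    rw [PySem.Dict.items_eq_map_keys _ hnd 0, hkeys, PySem.Dict.items_counter]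
    apply List.map_congr_left
    intro k _
    have hg := pv_foldKeys_getD (PySem.Set.ofList ws) (fun k => (List.count k ws : Int))
      (PySem.Dict.counter P) k (PySem.Set.nodup_ofList ws)
    rw [hg, PySem.Dict.getD_counter]
    by_cases hm : k ∈ ws
    · simp [PySem.Set.mem_ofList, hm, List.count_append]
    · simp [PySem.Set.mem_ofList, hm, List.count_append, List.count_eq_zero_of_not_mem hm]
  · show (P.length : Int) + ((PySem.Dict.counter ws : PySem.Dict String Int).items.map (·.2)).sum
      = ((P ++ ws).length : Int)
    rw [pv_sum_counter]; simp [List.length_append]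

-- flat word lists of the zipped documents, by label
def pvFlat (b : Bool) (zs : List (List String × Bool)) : List String :=
  (zs.filter (fun z => z.2 == b)).flatMap (·.1)

theorem pvFlat_cons (b : Bool) (z : List String × Bool) (zs : List (List String × Bool)) :
    pvFlat b (z :: zs) = if z.2 = b then z.1 ++ pvFlat b zs else pvFlat b zs := by
  by_cases h : z.2 = b <;> simp [pvFlat, h]

theorem pv_B_fold (zs : List (List String × Bool)) (P N : List String) :
    zs.foldl (fun (pn : List String × List String) p =>
        if p.2 then (pn.1 ++ p.1, pn.2) else (pn.1, pn.2 ++ p.1)) (P, N)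
    = (P ++ pvFlat true zs, N ++ pvFlat false zs) := by
  induction zs generalizing P N with
  | nil => simp [pvFlat]
  | cons z rest ih =>
    rw [List.foldl_cons]
    cases hz : z.2 <;>
      simp [ih, pvFlat_cons, hz, List.append_assoc]

theorem pv_A_fold (zs : List (List String × Bool)) (P N : List String) :
    zs.foldl (fun (st : PySem.Dict String Int × PySem.Dict String Int × Int × Int) z =>
        (PySem.Dict.counter z.1 : PySem.Dict String Int).items.foldl
          (fun st kv =>
            if z.2 then
              (st.1.insert kv.1 (st.1.getD kv.1 0 + kv.2), st.2.1, st.2.2.1 + kv.2, st.2.2.2)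
            else
              (st.1, st.2.1.insert kv.1 (st.2.1.getD kv.1 0 + kv.2), st.2.2.1, st.2.2.2 + kv.2))
          st)
      (PySem.Dict.counter P, PySem.Dict.counter N, (P.length : Int), (N.length : Int))
    = (PySem.Dict.counter (P ++ pvFlat true zs), PySem.Dict.counter (N ++ pvFlat false zs),
       ((P ++ pvFlat true zs).length : Int), ((N ++ pvFlat false zs).length : Int)) := by
  induction zs generalizing P N with
  | nil => simp [pvFlat]
  | cons z rest ih =>
    rw [List.foldl_cons]
    cases hz : z.2
    · simp only [Bool.false_eq_true, if_false]
      rw [pv_step_false, pv_merge_counter]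
      dsimp only
      rw [ih]
      simp [pvFlat_cons, hz, List.append_assoc]
    · simp only [if_true]
      rw [pv_step_true, pv_merge_counter]
      dsimp only
      rw [ih]
      simp [pvFlat_cons, hz, List.append_assoc]

theorem pv_range_zip :
    ∀ (ls : List Bool) (ts : List (List String)), ls.length ≤ ts.length →
    ∀ (init : PySem.Dict String Int × PySem.Dict String Int × Int × Int),
    (List.range ls.length).foldl (fun st k =>
        (PySem.Dict.counter (ts.getD k []) : PySem.Dict String Int).items.foldl
          (fun st kv =>
            if ls.getD k false = true then
              (st.1.insert kv.1 (st.1.getD kv.1 0 + kv.2), st.2.1, st.2.2.1 + kv.2, st.2.2.2)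
            else
              (st.1, st.2.1.insert kv.1 (st.2.1.getD kv.1 0 + kv.2), st.2.2.1, st.2.2.2 + kv.2))
          st) init
    = (ts.zip ls).foldl (fun st z =>
        (PySem.Dict.counter z.1 : PySem.Dict String Int).items.foldl
          (fun st kv =>
            if z.2 = true then
              (st.1.insert kv.1 (st.1.getD kv.1 0 + kv.2), st.2.1, st.2.2.1 + kv.2, st.2.2.2)
            else
              (st.1, st.2.1.insert kv.1 (st.2.1.getD kv.1 0 + kv.2), st.2.2.1, st.2.2.2 + kv.2))
          st) init := by
  intro ls
  induction ls with
  | nil => intro ts _ init; simp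
  | cons b l ih =>
    intro ts h init
    cases ts with
    | nil => simp at h
    | cons t ts' =>
      rw [List.length_cons, List.range_succ_eq_map, List.foldl_cons, List.foldl_map]
      simp only [List.getD_cons_zero, List.getD_cons_succ, List.zip_cons_cons, List.foldl_cons]
      exact ih ts' (by simpa using h) _

-- ===== VERDICT (by name: the statement is the Claim_ definition above) =====
theorem create_word_counts_spec : Claim_equal_create_word_counts := by
  intro ts ls _ hpre
  unfold Spec_create_word_counts create_word_counts create_word_counts_alt
  dsimp only
  rw [PySem.List.len_eq, PySem.List.pyRange_one]
  simp only [sub_zero, Int.toNat_natCast, List.foldl_map, zero_add, PySem.List.pyGetD_natCast]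
  rw [pv_range_zip ls ts hpre]
  have h0 : (PySem.Dict.empty, PySem.Dict.empty, (0 : Int), (0 : Int))
      = ((PySem.Dict.counter ([] : List String) : PySem.Dict String Int),
         (PySem.Dict.counter ([] : List String) : PySem.Dict String Int),
         (([] : List String).length : Int), (([] : List String).length : Int)) := rfl
  rw [h0, pv_A_fold, pv_B_fold]
  simp [PySem.List.len_eq]
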